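-- pv_equiv track=rewrite | github.com/plugarivan/ege_informatika_python | zadanie_23/23-16.py | f
-- ===== SOURCE A (Python) =====
-- def f(x, y):
--     if x > y or y == 15:
--         return 0
--     if x == y:
--         return 1
--     if y % 3 == 0:
--         return f(x, y - 1) + f(x, y - 2) + f(x, y // 3)
--     return f(x, y - 1) + f(x, y - 2)
-- ===== SOURCE B (Python) =====
-- def f(x, y):
--     # Bottom-up DP over the values x..y instead of A's branching recursion.
--     if x > y or y == 15:
--         return 0
--     dp = {x: 0 if x == 15 else 1}
--     for v in range(x + 1, y + 1):
--         dp[v] = 0 if v == 15 else (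
--             dp.get(v - 1, 0) + dp.get(v - 2, 0)
--             + (dp.get(v // 3, 0) if v % 3 == 0 else 0))
--     return dp[y]
-- ===== Notes on version B (the rewrite author's own statement) =====
-- stated objective: alternative
-- what changed: Replaces A's branching recursion over (y-1, y-2, y//3) with a single bottom-up dynamic-programming pass that tabulates the path count for every value from x to y in a dict.
import Mathlib
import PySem

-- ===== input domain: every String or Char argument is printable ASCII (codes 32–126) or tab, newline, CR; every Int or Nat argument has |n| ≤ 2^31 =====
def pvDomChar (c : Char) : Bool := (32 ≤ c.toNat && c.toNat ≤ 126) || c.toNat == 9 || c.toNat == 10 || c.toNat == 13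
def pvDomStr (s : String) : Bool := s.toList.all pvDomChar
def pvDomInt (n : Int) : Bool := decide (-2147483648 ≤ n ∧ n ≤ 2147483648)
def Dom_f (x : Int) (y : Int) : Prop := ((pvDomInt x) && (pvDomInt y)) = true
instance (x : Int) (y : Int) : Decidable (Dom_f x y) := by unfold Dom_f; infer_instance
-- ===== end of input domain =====

-- B replaces A's branching recursion by one bottom-up DP pass tabulating the values x..y (alternative algorithm; return value only, no mutation).

-- ===== PORT A =====
-- A's recursion is not well-founded for x < 0 (it cycles through y//3 and Python
-- raises RecursionError there); the port uses a fuel counter that Pre_f proves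
-- sufficient on every input where the Python A returns.
def fRec : Nat → Int → Int → Int
  | 0, _, _ => 0
  | n+1, x, y =>
    if x > y ∨ y = 15 then 0
    else if x = y then 1
    else if PySem.Int.mod y 3 = 0 then
      fRec n x (y - 1) + fRec n x (y - 2) + fRec n x (PySem.Int.floordiv y 3)
    else fRec n x (y - 1) + fRec n x (y - 2)

def f (x : Int) (y : Int) : Int := fRec ((y - x).toNat + y.toNat + 1) x y

-- ===== PORT B =====
def fStep (d : PySem.Dict Int Int) (v : Int) : PySem.Dict Int Int :=
  d.insert v (if v = 15 then 0 else
    d.getD (v - 1) 0 + d.getD (v - 2) 0 +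
      (if PySem.Int.mod v 3 = 0 then d.getD (PySem.Int.floordiv v 3) 0 else 0))

def f_alt (x : Int) (y : Int) : Int :=
  if x > y ∨ y = 15 then 0
  else
    let dp := (PySem.List.pyRange (x + 1) (y + 1) 1).foldl fStep
      ((PySem.Dict.empty).insert x (if x = 15 then 0 else 1))
    dp.getD y 0

-- ===== PRECONDITION & SPEC =====
-- Pre_f excludes exactly the inputs on which the Python A never returns: for x < 0,
-- as soon as some non-positive multiple of 3 lies in (x, y], the recursion cycles
-- through y//3 and raises RecursionError; A returns on every other input.
def Pre_f (x : Int) (y : Int) : Prop :=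
  ¬ (3 * (PySem.Int.floordiv x 3 + 1) ≤ y ∧ 3 * (PySem.Int.floordiv x 3 + 1) ≤ 0)
instance (x : Int) (y : Int) : Decidable (Pre_f x y) := by unfold Pre_f; infer_instance

def pvWitness_f : Int × Int := (0, 10)

def Spec_f (x : Int) (y : Int) (out : Int) : Prop := out = f_alt x y
instance (x : Int) (y : Int) (out : Int) : Decidable (Spec_f x y out) := by unfold Spec_f; infer_instance

-- ===== CLAIM (what is proved, stated in full; the proofs are below) =====
def Claim_equal_f : Prop := ∀ (x : Int) (y : Int), Dom_f x y → Pre_f x y → Spec_f x y (f x y)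

-- ===== LEMMAS AND PROOFS =====

-- the fuel measure
def fMu (x y : Int) : Nat := (y - x).toNat + y.toNat

-- Pre_f is monotone (downward) in y
lemma pre_mono {x y y' : Int} (h : Pre_f x y) (hle : y' ≤ y) : Pre_f x y' := by
  unfold Pre_f at h ⊢; omega

-- under Pre_f, if the y % 3 == 0 branch fires then 1 ≤ y
lemma pre_branch_pos {x y : Int} (hp : Pre_f x y) (hxy : x < y)
    (h3 : PySem.Int.mod y 3 = 0) : 1 ≤ y := by
  by_contra h
  push Not at h
  rw [PySem.Int.mod_eq_emod_of_pos (by norm_num)] at h3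
  have hdvd : (3 : Int) ∣ y := Int.dvd_of_emod_eq_zero h3
  -- y itself is a non-positive multiple of 3 in (x, y]; show Pre_f is violated
  unfold Pre_f at hp
  apply hp
  have hx3 : PySem.Int.floordiv x 3 * 3 ≤ x ∧ x < (PySem.Int.floordiv x 3 + 1) * 3 := by
    have h1 := PySem.Int.floordiv_mul_add_mod x 3
    have h2 := PySem.Int.mod_nonneg x (b := 3) (by norm_num)
    have h3' := PySem.Int.mod_lt x (b := 3) (by norm_num)
    constructor <;> nlinarith
  obtain ⟨k, hk⟩ := hdvd
  omega

lemma floordiv_lt_self {y : Int} (hy : 1 ≤ y) :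
    0 ≤ PySem.Int.floordiv y 3 ∧ PySem.Int.floordiv y 3 < y := by
  rw [PySem.Int.floordiv_eq_ediv_of_pos (by norm_num)]
  constructor <;> omega

-- fuel irrelevance: any fuel above the measure gives the same value (under Pre_f)
lemma fRec_fuel (k : Nat) : ∀ x y, Pre_f x y → fMu x y < k →
    ∀ n m, fMu x y < n → fMu x y < m → fRec n x y = fRec m x y := by
  induction k with
  | zero => intro x y _ h; omega
  | succ k ih =>
    intro x y hp hk n m hn hm
    obtain ⟨n, rfl⟩ : ∃ n', n = n' + 1 := ⟨n - 1, by omega⟩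
    obtain ⟨m, rfl⟩ : ∃ m', m = m' + 1 := ⟨m - 1, by omega⟩
    show fRec (n+1) x y = fRec (m+1) x y
    rw [fRec, fRec]
    by_cases h1 : x > y ∨ y = 15
    · simp [h1]
    · simp only [if_neg h1]
      push Not at h1
      by_cases h2 : x = y
      · simp [h2]
      · simp only [if_neg h2]
        have hxy : x < y := lt_of_le_of_ne h1.1 h2
        have hmu1 : fMu x (y - 1) < fMu x y := by unfold fMu; omega
        have hmu2 : fMu x (y - 2) < fMu x y := by unfold fMu; omega
        have e1 : fRec n x (y-1) = fRec m x (y-1) :=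
          ih x (y-1) (pre_mono hp (by omega)) (by omega) n m (by omega) (by omega)
        have e2 : fRec n x (y-2) = fRec m x (y-2) :=
          ih x (y-2) (pre_mono hp (by omega)) (by omega) n m (by omega) (by omega)
        by_cases h3 : PySem.Int.mod y 3 = 0
        · have hy1 : 1 ≤ y := pre_branch_pos hp hxy h3
          have hfd := floordiv_lt_self hy1
          have hmu3 : fMu x (PySem.Int.floordiv y 3) < fMu x y := by unfold fMu; omega
          have e3 : fRec n x (PySem.Int.floordiv y 3) = fRec m x (PySem.Int.floordiv y 3) :=
            ih x _ (pre_mono hp (by omega)) (by omega) n m (by omega) (by omega)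
          rw [if_pos h3, if_pos h3, e1, e2, e3]
        · rw [if_neg h3, if_neg h3, e1, e2]

lemma f_eq_fRec {x y : Int} (hp : Pre_f x y) {n : Nat} (hn : fMu x y < n) :
    f x y = fRec n x y := by
  unfold f
  exact fRec_fuel (fMu x y + 1) x y hp (by omega) _ n (by unfold fMu; omega) hn

-- the recurrence satisfied by f (port of A) under Pre_f
lemma f_base_out {x y : Int} (h : x > y ∨ y = 15) : f x y = 0 := by
  unfold f; rw [fRec]; simp [h]

lemma f_base_eq {x : Int} (h : x ≠ 15) : f x x = 1 := by
  unfold f; rw [fRec]; simp [h]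

lemma f_rec {x y : Int} (hp : Pre_f x y) (h1 : x < y) (h15 : y ≠ 15) :
    f x y = f x (y - 1) + f x (y - 2) +
      (if PySem.Int.mod y 3 = 0 then f x (PySem.Int.floordiv y 3) else 0) := by
  conv_lhs => rw [f, fRec]
  have hng : ¬ (x > y ∨ y = 15) := by omega
  simp only [if_neg hng, if_neg (by omega : ¬ x = y)]
  have e1 : fRec ((y - x).toNat + y.toNat) x (y - 1) = f x (y - 1) :=
    (f_eq_fRec (pre_mono hp (by omega)) (by unfold fMu; omega)).symm
  have e2 : fRec ((y - x).toNat + y.toNat) x (y - 2) = f x (y - 2) :=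
    (f_eq_fRec (pre_mono hp (by omega)) (by unfold fMu; omega)).symm
  by_cases h3 : PySem.Int.mod y 3 = 0
  · have hy1 : 1 ≤ y := pre_branch_pos hp h1 h3
    have hfd := floordiv_lt_self hy1
    have e3 : fRec ((y - x).toNat + y.toNat) x (PySem.Int.floordiv y 3) =
        f x (PySem.Int.floordiv y 3) :=
      (f_eq_fRec (pre_mono hp (by omega)) (by unfold fMu; omega)).symm
    rw [if_pos h3, if_pos h3, e1, e2, e3]
  · rw [if_neg h3, if_neg h3, e1, e2, add_zero]

-- DP invariant: after processing values x+1 .. x+k, every entry up to x+k holds f x u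
lemma dp_inv (x y : Int) (hp : Pre_f x y) (k : Nat) (hk : x + k ≤ y) :
    ∀ u : Int, u ≤ x + k →
      ((PySem.List.pyRange (x + 1) (x + k + 1) 1).foldl fStep
        ((PySem.Dict.empty).insert x (if x = 15 then 0 else 1))).getD u 0 = f x u := by
  induction k with
  | zero =>
    intro u hu
    rw [show x + (0:Nat) + 1 = x + 1 by push_cast; ring,
        PySem.List.pyRange_one_eq_nil (by omega)]
    rw [List.foldl_nil, PySem.Dict.getD_insert]
    by_cases hux : u = x
    · subst hux
      rw [if_pos rfl]
      by_cases h15 : u = 15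
      · rw [if_pos h15, h15, f_base_out (Or.inr rfl)]
      · rw [if_neg h15, f_base_eq h15]
    · rw [if_neg hux, PySem.Dict.getD_empty, f_base_out (Or.inl (by omega))]
  | succ k ih =>
    intro u hu
    have hk' : x + k ≤ y := by push_cast at hk ⊢; omega
    set v : Int := x + k + 1 with hv
    rw [show x + ((k+1 : Nat) : Int) + 1 = v + 1 by push_cast; ring,
        PySem.List.pyRange_one_succ_right (by omega),
        List.foldl_append]
    simp only [List.foldl_cons, List.foldl_nil]
    rw [fStep, PySem.Dict.getD_insert]
    have hu' : u ≤ v := by push_cast at hu; omega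
    by_cases huv : u = v
    · rw [if_pos huv, huv]
      by_cases h15 : v = 15
      · rw [if_pos h15, h15, f_base_out (Or.inr rfl)]
      · rw [if_neg h15]
        have hvle : v ≤ y := by push_cast at hk; omega
        rw [f_rec (pre_mono hp hvle) (by omega) h15]
        rw [ih hk' (v - 1) (by omega), ih hk' (v - 2) (by omega)]
        by_cases h3 : PySem.Int.mod v 3 = 0
        · have hv1 : 1 ≤ v := pre_branch_pos (pre_mono hp hvle) (by omega) h3
          have hfd := floordiv_lt_self hv1
          rw [if_pos h3, if_pos h3, ih hk' (PySem.Int.floordiv v 3) (by omega)]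
        · rw [if_neg h3, if_neg h3]
    · rw [if_neg huv]
      exact ih hk' u (by omega)

-- ===== VERDICT (by name: the statement is the Claim_ definition above) =====
theorem f_spec : Claim_equal_f := by
  intro x y _ hp
  unfold Spec_f f_alt
  by_cases h1 : x > y ∨ y = 15
  · rw [if_pos h1, f_base_out h1]
  · rw [if_neg h1]
    push Not at h1
    have hk : x + ((y - x).toNat : Int) = y := by omega
    have := dp_inv x y hp (y - x).toNat (by omega) y (by omega)
    rw [hk] at this
    exact this.symm
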